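-- pv_equiv track=rewrite | github.com/gabsillis/iceicle | scripts/general_cgns_silvester_indices.py | gen_free_index_set
-- ===== SOURCE A (Python) =====
-- def gen_free_index_set(nfree, maxdim):
--     free_index_set = []
--     # base case nfree = 2
--     if nfree == 2:
--         for idim in range(nfree-1, maxdim+1):
--             # generate all the free indices added in the idim-th dimension
--             top_list = 2 * [0]
--             top_list[1] = idim;
--             for jdim in range(idim):
--                 free_indices = top_list.copy()
--                 free_indices[0] = jdim
--                 free_index_set.append(free_indices)
--
--             # Manual fix for NASA CGNS shenanigans (for the 2D triangle we do ccw and then abandon that convention)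
--             if(len(free_index_set) > 2):
--                 free_index_set[1] = [1, 2]
--                 free_index_set[2] = [0, 2]
--     else:
--         for idim in range(nfree-1, maxdim+1):
--             # generate all the free indices recursively
--             # [[nfree = ndim-1, maxdim = idim - 1], idim]
--             sublist = gen_free_index_set(nfree-1, idim-1)
--             for free_indices_base in sublist:
--                 free_indices = free_indices_base.copy()
--                 free_indices.append(idim)
--                 free_index_set.append(free_indices)
--
--     return free_index_set
-- ===== SOURCE B (Python) =====
-- def gen_free_index_set(nfree, maxdim):
--     if nfree < 2 or maxdim < nfree - 1:
--         return []  # no room for nfree distinct ascending indices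
--     # level k = 2: blocks[i] = the pairs whose largest index is i, for the dims we will need
--     hi = maxdim - (nfree - 2)
--     blocks = [[[j, i] for j in range(i)] for i in range(hi + 1)]
--     if hi >= 2:
--         blocks[2] = [[1, 2], [0, 2]]  # CGNS 2D-triangle ordering fix
--     for k in range(3, nfree + 1):
--         hi = maxdim - (nfree - k)
--         new_blocks = []
--         prefix = []
--         for i in range(hi + 1):
--             new_blocks.append([x + [i] for x in prefix])
--             if i < len(blocks):
--                 prefix.extend(blocks[i])
--         blocks = new_blocks
--     return [x for b in blocks for x in b]
-- ===== Notes on version B (the rewrite author's own statement) =====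
-- stated objective: faster
-- what changed: Replaces A's top-down recursion (which recomputes each (nfree-1, idim-1) subproblem once per enclosing call) with a bottom-up DP that builds, level by level, the blocks of index tuples grouped by their largest index, reusing a running prefix so every subproblem is materialised exactly once.
-- crash fix: On nfree <= 1 with maxdim >= nfree-1 A recurses without a base case and raises RecursionError; B returns []. — e.g. on gen_free_index_set(1, 0): A raises RecursionError, B returns []
import Mathlib
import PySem

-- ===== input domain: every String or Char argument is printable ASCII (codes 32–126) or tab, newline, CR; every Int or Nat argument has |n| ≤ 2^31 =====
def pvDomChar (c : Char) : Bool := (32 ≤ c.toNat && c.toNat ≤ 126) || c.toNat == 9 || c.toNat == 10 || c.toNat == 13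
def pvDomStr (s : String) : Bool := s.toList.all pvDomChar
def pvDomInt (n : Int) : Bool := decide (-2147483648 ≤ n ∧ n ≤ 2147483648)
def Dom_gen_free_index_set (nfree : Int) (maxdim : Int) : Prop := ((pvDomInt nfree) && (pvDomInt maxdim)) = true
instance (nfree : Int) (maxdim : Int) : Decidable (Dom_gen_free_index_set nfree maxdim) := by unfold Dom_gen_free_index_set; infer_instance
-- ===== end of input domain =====

-- B replaces A's top-down recursion (which recomputes shared subproblems) by a bottom-up
-- level-by-level DP over blocks grouped by largest index; return values agree on Pre_.

-- ===== PORT A =====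
-- fuel makes the Python recursion total: on every input admitted by Pre_ the fuel nfree.toNat
-- suffices, so the port computes exactly what the Python computes there.
def pvGenA : Nat → Int → Int → List (List Int)
  | 0, _, _ => []
  | fuel+1, nfree, maxdim =>
    if nfree = 2 then
      (PySem.List.pyRange (nfree-1) (maxdim+1) 1).foldl (fun acc idim =>
        let acc := (PySem.List.pyRange 0 idim 1).foldl (fun a jdim => a ++ [[jdim, idim]]) acc
        if acc.length > 2 then (acc.set 1 [1, 2]).set 2 [0, 2] else acc) []
    else
      (PySem.List.pyRange (nfree-1) (maxdim+1) 1).foldl (fun acc idim =>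
        acc ++ (pvGenA fuel (nfree-1) (idim-1)).map (fun b => b ++ [idim])) []

def gen_free_index_set (nfree : Int) (maxdim : Int) : List (List Int) :=
  pvGenA nfree.toNat nfree maxdim

-- ===== PORT B =====
def gen_free_index_set_alt (nfree : Int) (maxdim : Int) : List (List Int) :=
  if nfree < 2 ∨ maxdim < nfree - 1 then []
  else
    let hi := maxdim - (nfree - 2)
    let blocks := (PySem.List.pyRange 0 (hi+1) 1).map (fun i =>
        (PySem.List.pyRange 0 i 1).map (fun j => [j, i]))
    let blocks := if hi ≥ 2 then blocks.set 2 [[1, 2], [0, 2]] else blocks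
    let blocks := (PySem.List.pyRange 3 (nfree+1) 1).foldl (fun blocks k =>
        let hi := maxdim - (nfree - k)
        ((PySem.List.pyRange 0 (hi+1) 1).foldl
          (fun (st : List (List (List Int)) × List (List Int)) i =>
            (st.1 ++ [st.2.map (fun x => x ++ [i])],
             if i < (blocks.length : Int) then st.2 ++ blocks.getD i.toNat [] else st.2))
          ([], [])).1) blocks
    blocks.flatMap id

-- ===== PRECONDITION & SPEC =====
-- Pre_ excludes exactly nfree ≤ 1 with maxdim ≥ nfree-1: there the Python recursion has no
-- base case and raises RecursionError (see Raises_ below); A returns normally everywhere else.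
def Pre_gen_free_index_set (nfree : Int) (maxdim : Int) : Prop :=
  2 ≤ nfree ∨ maxdim ≤ nfree - 2
instance (nfree : Int) (maxdim : Int) : Decidable (Pre_gen_free_index_set nfree maxdim) := by
  unfold Pre_gen_free_index_set; infer_instance

def pvWitness_gen_free_index_set : Int × Int := (3, 4)

-- On nfree ≤ 1 with maxdim ≥ nfree-1 A recurses without a base case and raises RecursionError; B returns [].
def Raises_gen_free_index_set (nfree : Int) (maxdim : Int) : Prop :=
  nfree ≤ 1 ∧ nfree - 1 ≤ maxdim
instance (nfree : Int) (maxdim : Int) : Decidable (Raises_gen_free_index_set nfree maxdim) := by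
  unfold Raises_gen_free_index_set; infer_instance
def pvRaiseWitness_gen_free_index_set : Int × Int := (1, 0)
def pvRaiseWitnessOut_gen_free_index_set : List (List Int) := []

def Spec_gen_free_index_set (nfree : Int) (maxdim : Int) (out : List (List Int)) : Prop :=
  out = gen_free_index_set_alt nfree maxdim
instance (nfree : Int) (maxdim : Int) (out : List (List Int)) : Decidable (Spec_gen_free_index_set nfree maxdim out) := by
  unfold Spec_gen_free_index_set; infer_instance

-- ===== CLAIM (what is proved, stated in full; the proofs are below) =====
def Claim_equal_gen_free_index_set : Prop := ∀ (nfree : Int) (maxdim : Int), Dom_gen_free_index_set nfree maxdim → Pre_gen_free_index_set nfree maxdim → Spec_gen_free_index_set nfree maxdim (gen_free_index_set nfree maxdim)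

def Claim_raises_gen_free_index_set : Prop := (∀ (nfree : Int) (maxdim : Int), Dom_gen_free_index_set nfree maxdim → Raises_gen_free_index_set nfree maxdim → ¬ Pre_gen_free_index_set nfree maxdim) ∧ (Dom_gen_free_index_set (pvRaiseWitness_gen_free_index_set.1) (pvRaiseWitness_gen_free_index_set.2) ∧ Raises_gen_free_index_set (pvRaiseWitness_gen_free_index_set.1) (pvRaiseWitness_gen_free_index_set.2) ∧ gen_free_index_set_alt (pvRaiseWitness_gen_free_index_set.1) (pvRaiseWitness_gen_free_index_set.2) = pvRaiseWitnessOut_gen_free_index_set)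

-- ===== LEMMAS AND PROOFS =====

-- the mathematical value both programs compute: pvF t m = the free index set for nfree = t+2, maxdim = m,
-- presented as the concatenation of the per-dimension blocks pvBlock t i.
def pvBlock0 (i : Int) : List (List Int) :=
  if i = 2 then [[1, 2], [0, 2]] else (PySem.List.pyRange 0 i 1).map (fun j => [j, i])

def pvF : Nat → Int → List (List Int)
  | 0, m => (PySem.List.pyRange 0 (m+1) 1).flatMap pvBlock0
  | t+1, m => (PySem.List.pyRange 0 (m+1) 1).flatMap (fun i => (pvF t (i-1)).map (fun x => x ++ [i]))

def pvBlock : Nat → Int → List (List Int)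
  | 0, i => pvBlock0 i
  | t+1, i => (pvF t (i-1)).map (fun x => x ++ [i])

lemma pvF_eq_flatMap (t : Nat) (m : Int) :
    pvF t m = (PySem.List.pyRange 0 (m+1) 1).flatMap (pvBlock t) := by
  cases t <;> rfl

lemma pvF_nil : ∀ (t : Nat) (m : Int), m ≤ (t : Int) → pvF t m = []
  | 0, m, h => by
    by_cases h0 : m + 1 ≤ 0
    · show (PySem.List.pyRange 0 (m+1) 1).flatMap pvBlock0 = []
      rw [PySem.List.pyRange_one_eq_nil h0]; rfl
    · have hm : m = 0 := by omega
      subst hm; decide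
  | t+1, m, h => by
    show (PySem.List.pyRange 0 (m+1) 1).flatMap _ = []
    rw [List.flatMap_eq_nil_iff]
    intro i hi
    rw [PySem.List.mem_pyRange_one] at hi
    rw [pvF_nil t (i-1) (by omega)]
    rfl

lemma pvF_succ_right (t : Nat) (m : Int) (hm : 0 ≤ m) :
    pvF t m = pvF t (m-1) ++ pvBlock t m := by
  rw [pvF_eq_flatMap, pvF_eq_flatMap]
  have h : m - 1 + 1 = m := by omega
  rw [h, PySem.List.pyRange_one_succ_right hm, List.flatMap_append]
  simp

-- A's base case (nfree = 2) computes pvF 0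
lemma A_base_fold : ∀ (n : Nat),
    (PySem.List.pyRange 1 ((n : Int)+1) 1).foldl (fun acc idim =>
        let acc := (PySem.List.pyRange 0 idim 1).foldl (fun a jdim => a ++ [[jdim, idim]]) acc
        if acc.length > 2 then (acc.set 1 [1, 2]).set 2 [0, 2] else acc) []
    = (PySem.List.pyRange 1 ((n : Int)+1) 1).flatMap pvBlock0
  | 0 => by decide
  | 1 => by decide
  | 2 => by decide
  | (n+3) => by
    have hN : ((n+3:Nat):Int) + 1 = (((n+2:Nat):Int) + 1) + 1 := by push_cast; ring
    rw [hN, PySem.List.pyRange_one_succ_right (by push_cast; omega), List.foldl_append,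
        List.flatMap_append, A_base_fold (n+2)]
    simp only [List.foldl_cons, List.foldl_nil, List.flatMap_cons, List.flatMap_nil,
      List.append_nil]
    rw [PySem.List.foldl_append_singleton_eq_map]
    have hsp : PySem.List.pyRange 1 (((n+2:Nat):Int)+1) 1
        = PySem.List.pyRange 1 3 1 ++ PySem.List.pyRange 3 (((n+2:Nat):Int)+1) 1 :=
      PySem.List.pyRange_one_append 1 3 _ (by omega) (by push_cast; omega)
    rw [hsp, List.flatMap_append, show (PySem.List.pyRange 1 3 1).flatMap pvBlock0
        = [[0,1],[1,2],[0,2]] from by decide]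
    have hbi : pvBlock0 (((n+2:Nat):Int)+1)
        = (PySem.List.pyRange 0 (((n+2:Nat):Int)+1) 1).map (fun j => [j, ((n+2:Nat):Int)+1]) := by
      unfold pvBlock0
      rw [if_neg (by push_cast; omega)]
    rw [hbi]
    rw [if_pos (by simp)]
    simp only [List.cons_append, List.nil_append]
    rw [show ∀ (a b c : List Int) (l : List (List Int)),
        ((a :: b :: c :: l).set 1 [1,2]).set 2 [0,2] = a :: [1,2] :: [0,2] :: l
        from fun a b c l => rfl]

lemma A_base (fuel : Nat) (m : Int) : pvGenA (fuel+1) 2 m = pvF 0 m := by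
  simp only [pvGenA]
  rw [if_pos trivial, show (2:Int) - 1 = 1 from by norm_num]
  by_cases hm : m + 1 ≤ 0
  · rw [PySem.List.pyRange_one_eq_nil (by omega), pvF_nil 0 m (by omega)]
    rfl
  · have hm0 : m = ((m.toNat : Nat) : Int) := by omega
    rw [hm0, A_base_fold m.toNat]
    have h2 : PySem.List.pyRange 0 (((m.toNat : Nat):Int)+1) 1
        = 0 :: PySem.List.pyRange 1 (((m.toNat : Nat):Int)+1) 1 := by
      rw [PySem.List.pyRange_one_cons (by omega)]
      norm_num
    rw [show pvF 0 (((m.toNat : Nat)):Int)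
        = (PySem.List.pyRange 0 (((m.toNat : Nat):Int)+1) 1).flatMap pvBlock0 from rfl,
      h2, List.flatMap_cons, show pvBlock0 0 = [] from by decide, List.nil_append]

lemma A_eq_F : ∀ (t fuel : Nat) (m : Int), t + 2 ≤ fuel →
    pvGenA fuel ((t : Int) + 2) m = pvF t m
  | 0, fuel, m, h => by
    obtain ⟨f, rfl⟩ : ∃ f, fuel = f + 1 := ⟨fuel - 1, by omega⟩
    rw [show ((0:Nat):Int) + 2 = 2 from by norm_num]
    exact A_base f m
  | t+1, fuel, m, h => by
    obtain ⟨f, rfl⟩ : ∃ f, fuel = f + 1 := ⟨fuel - 1, by omega⟩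
    simp only [pvGenA]
    rw [if_neg (by push_cast; omega)]
    rw [show (((t+1:Nat):Int)+2) - 1 = ((t:Nat):Int) + 2 from by push_cast; ring]
    have hfun : (fun (acc : List (List Int)) (idim : Int) =>
          acc ++ (pvGenA f (((t:Nat):Int)+2) (idim-1)).map (fun b => b ++ [idim]))
        = (fun acc idim => acc ++ (pvF t (idim-1)).map (fun b => b ++ [idim])) := by
      funext acc idim
      rw [A_eq_F t f (idim-1) (by omega)]
    rw [hfun, PySem.List.foldl_append_eq_flatMap, List.nil_append]
    rw [show pvF (t+1) m = (PySem.List.pyRange 0 (m+1) 1).flatMap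
        (fun i => (pvF t (i-1)).map (fun x => x ++ [i])) from rfl]
    by_cases hm : m + 1 ≤ (t:Int) + 2
    · rw [PySem.List.pyRange_one_eq_nil hm]
      rw [show (PySem.List.pyRange 0 (m+1) 1).flatMap
          (fun i => (pvF t (i-1)).map (fun x => x ++ [i]))
          = pvF (t+1) m from rfl, pvF_nil (t+1) m (by push_cast; omega)]
      rfl
    · rw [PySem.List.pyRange_one_append 0 (((t:Nat):Int)+2) (m+1) (by omega) (by omega),
          List.flatMap_append]
      have h0 : (PySem.List.pyRange 0 (((t:Nat):Int)+2) 1).flatMap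
          (fun i => (pvF t (i-1)).map (fun x => x ++ [i])) = [] := by
        rw [List.flatMap_eq_nil_iff]
        intro i hi
        rw [PySem.List.mem_pyRange_one] at hi
        rw [pvF_nil t (i-1) (by omega)]
        rfl
      rw [h0, List.nil_append]

-- B's inner loop: given the previous level's blocks, it produces the next level's blocks
-- and maintains the running prefix (the previous level's free index set).
lemma inner_fold (t : Nat) (H : Int) (blocks : List (List (List Int)))
    (hb : blocks = (PySem.List.pyRange 0 H 1).map (pvBlock t)) (J : Int) (hJ : J ≤ H + 1) :
    (PySem.List.pyRange 0 J 1).foldl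
      (fun (st : List (List (List Int)) × List (List Int)) i =>
        (st.1 ++ [st.2.map (fun x => x ++ [i])],
         if i < (blocks.length : Int) then st.2 ++ blocks.getD i.toNat [] else st.2))
      ([], [])
    = ((PySem.List.pyRange 0 J 1).map (pvBlock (t+1)), pvF t (min J H - 1)) := by
  by_cases h0 : J ≤ 0
  · rw [PySem.List.pyRange_one_eq_nil h0, pvF_nil t (min J H - 1) (by omega)]
    rfl
  · have hJ1 : J = (J - 1) + 1 := by omega
    rw [hJ1, PySem.List.pyRange_one_succ_right (by omega : (0:Int) ≤ J - 1),
        List.foldl_append, List.map_append,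
        inner_fold t H blocks hb (J-1) (by omega)]
    simp only [List.foldl_cons, List.foldl_nil, List.map_cons, List.map_nil]
    have hmin : min (J-1) H = J - 1 := by omega
    rw [hmin]
    have hlen : blocks.length = H.toNat := by
      rw [hb]
      simp [PySem.List.length_pyRange_one]
    rw [hlen, Prod.mk.injEq]
    refine ⟨by rw [show pvBlock (t+1) (J-1) = (pvF t (J-1-1)).map (fun x => x ++ [J-1]) from rfl], ?_⟩
    split_ifs with hlt
    · have hgd : blocks.getD (J-1).toNat [] = pvBlock t (J-1) := by
        rw [hb]
        have hl : (J-1).toNat < ((PySem.List.pyRange 0 H 1).map (pvBlock t)).length := by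
          simp only [List.length_map, PySem.List.length_pyRange_one]
          omega
        rw [List.getD_eq_getElem _ _ hl, List.getElem_map, PySem.List.getElem_pyRange_one]
        congr 1
        omega
      rw [hgd, ← pvF_succ_right t (J-1) (by omega)]
      congr 1
      omega
    · congr 1
      omega
termination_by J.toNat
decreasing_by omega

-- the initial comprehension plus the CGNS fix is exactly the level-2 blocks
lemma init_blocks (hi : Int) :
    (if hi ≥ 2 then
        ((PySem.List.pyRange 0 (hi+1) 1).map (fun i =>
          (PySem.List.pyRange 0 i 1).map (fun j => [j, i]))).set 2 [[1, 2], [0, 2]]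
      else (PySem.List.pyRange 0 (hi+1) 1).map (fun i =>
          (PySem.List.pyRange 0 i 1).map (fun j => [j, i])))
    = (PySem.List.pyRange 0 (hi+1) 1).map pvBlock0 := by
  split_ifs with h2
  · rw [PySem.List.pyRange_one_append 0 3 (hi+1) (by omega) (by omega),
        show PySem.List.pyRange 0 3 1 = [0, 1, 2] from by decide]
    simp only [List.map_cons, List.cons_append, List.nil_append]
    rw [show ∀ (a b c : List (List Int)) (l : List (List (List Int))),
        (a :: b :: c :: l).set 2 [[1,2],[0,2]] = a :: b :: [[1,2],[0,2]] :: l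
        from fun a b c l => rfl]
    rw [show pvBlock0 0 = (PySem.List.pyRange 0 (0:Int) 1).map (fun j => [j, (0:Int)]) from by decide,
        show pvBlock0 1 = (PySem.List.pyRange 0 (1:Int) 1).map (fun j => [j, (1:Int)]) from by decide,
        show pvBlock0 2 = [[1,2],[0,2]] from by decide]
    congr 1
    congr 1
    congr 1
    apply List.map_congr_left
    intro i hi'
    rw [PySem.List.mem_pyRange_one] at hi'
    unfold pvBlock0
    rw [if_neg (by omega)]
  · apply List.map_congr_left
    intro i hi'
    rw [PySem.List.mem_pyRange_one] at hi'
    unfold pvBlock0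
    rw [if_neg (by omega)]

-- B's outer loop builds the blocks of successive levels
lemma outer_fold (nfree maxdim : Int) :
    ∀ (u : Nat), (u:Int) ≤ nfree - 2 →
    (PySem.List.pyRange 3 (3 + (u:Int)) 1).foldl
      (fun blocks k =>
        ((PySem.List.pyRange 0 ((maxdim - (nfree - k))+1) 1).foldl
          (fun (st : List (List (List Int)) × List (List Int)) i =>
            (st.1 ++ [st.2.map (fun x => x ++ [i])],
             if i < (blocks.length : Int) then st.2 ++ blocks.getD i.toNat [] else st.2))
          ([], [])).1)
      ((PySem.List.pyRange 0 ((maxdim - (nfree - 2))+1) 1).map pvBlock0)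
    = (PySem.List.pyRange 0 (maxdim - (nfree - 2) + (u:Int) + 1) 1).map (pvBlock u)
  | 0, _ => by
    rw [show (3:Int) + ((0:Nat):Int) = 3 from by norm_num,
        show PySem.List.pyRange 3 3 1 = [] from by decide, List.foldl_nil,
        show maxdim - (nfree-2) + ((0:Nat):Int) + 1 = maxdim - (nfree-2) + 1 from by push_cast; ring]
    exact List.map_congr_left (fun i _ => rfl)
  | u+1, hu => by
    rw [show (3:Int) + ((u+1:Nat):Int) = (3 + ((u:Nat):Int)) + 1 from by push_cast; ring,
        PySem.List.pyRange_one_succ_right (by omega : (3:Int) ≤ 3 + ((u:Nat):Int)),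
        List.foldl_append, outer_fold nfree maxdim u (by push_cast at hu ⊢; omega)]
    simp only [List.foldl_cons, List.foldl_nil]
    rw [show maxdim - (nfree - (3 + ((u:Nat):Int))) = (maxdim - (nfree-2) + ((u:Nat):Int) + 1) from by ring]
    rw [inner_fold u (maxdim - (nfree-2) + ((u:Nat):Int) + 1) _ rfl
        ((maxdim - (nfree-2) + ((u:Nat):Int) + 1) + 1) (le_refl _)]
    rw [show maxdim - (nfree-2) + ((u+1:Nat):Int) + 1 = (maxdim - (nfree-2) + ((u:Nat):Int) + 1) + 1 from by push_cast; ring]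

lemma flatMap_id_map {α β : Type} (f : α → List β) (l : List α) :
    (l.map f).flatMap id = l.flatMap f := by
  induction l with
  | nil => rfl
  | cons a l ih => simp_all

lemma B_eq_F (nfree maxdim : Int) (h : 2 ≤ nfree) :
    gen_free_index_set_alt nfree maxdim = pvF (nfree - 2).toNat maxdim := by
  have hu : (((nfree - 2).toNat : Nat) : Int) = nfree - 2 := by omega
  by_cases hsm : maxdim < nfree - 1
  · simp only [gen_free_index_set_alt]
    rw [if_pos (Or.inr hsm), pvF_nil (nfree - 2).toNat maxdim (by omega)]
  · simp only [gen_free_index_set_alt]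
    rw [if_neg (by omega)]
    rw [init_blocks (maxdim - (nfree - 2))]
    rw [show nfree + 1 = 3 + (((nfree - 2).toNat : Nat) : Int) from by omega]
    rw [outer_fold nfree maxdim (nfree - 2).toNat (by omega)]
    rw [flatMap_id_map]
    rw [show maxdim - (nfree - 2) + (((nfree - 2).toNat : Nat) : Int) + 1 = maxdim + 1 from by omega]
    rw [pvF_eq_flatMap]

lemma A_nil (fuel : Nat) (nfree maxdim : Int) (h : maxdim ≤ nfree - 2) :
    pvGenA fuel nfree maxdim = [] := by
  cases fuel with
  | zero => rfl
  | succ f =>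
    show (if nfree = 2 then _ else _) = _
    split_ifs with h2 <;> rw [PySem.List.pyRange_one_eq_nil (by omega)] <;> rfl

-- ===== VERDICT (by name: the statement is the Claim_ definition above) =====
theorem gen_free_index_set_spec : Claim_equal_gen_free_index_set := by
  intro nfree maxdim _ hpre
  unfold Spec_gen_free_index_set
  by_cases h2 : 2 ≤ nfree
  · rw [B_eq_F nfree maxdim h2]
    show pvGenA nfree.toNat nfree maxdim = pvF (nfree - 2).toNat maxdim
    have hA := A_eq_F (nfree - 2).toNat nfree.toNat maxdim (by omega)
    rwa [show (((nfree - 2).toNat : Nat) : Int) + 2 = nfree from by omega] at hA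
  · have hmd : maxdim ≤ nfree - 2 := by
      rcases hpre with h | h
      · omega
      · exact h
    show pvGenA nfree.toNat nfree maxdim = _
    rw [A_nil nfree.toNat nfree maxdim hmd]
    unfold gen_free_index_set_alt
    rw [if_pos (by omega)]

theorem gen_free_index_set_raises : Claim_raises_gen_free_index_set := by
  unfold Claim_raises_gen_free_index_set
  constructor
  · intro nfree maxdim _ hr
    unfold Raises_gen_free_index_set at hr
    unfold Pre_gen_free_index_set
    omega
  · exact ⟨by decide, by decide, by decide⟩

-- corollary of `gen_free_index_set_raises`: the raise witness (1, 0) indeed lies outside Pre_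
theorem pvRaiseWitness_outside_pre_ok :
    ¬ Pre_gen_free_index_set pvRaiseWitness_gen_free_index_set.1 pvRaiseWitness_gen_free_index_set.2 := by
  have h := gen_free_index_set_raises
  unfold Claim_raises_gen_free_index_set at h
  exact h.1 pvRaiseWitness_gen_free_index_set.1 pvRaiseWitness_gen_free_index_set.2 (by decide) (by decide)
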